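-- pv_equiv track=rewrite | github.com/neelaryan2/CTFs | ctf/2021/acsc/pickle_rick/chal.py | my_k2
-- ===== SOURCE A (Python) =====
-- def my_k2(a):
--     ln = len(a)
--     arr = []
--     for i in range(ln):
--         s, j = 0, 0
--         for j in range(ln):
--             s += (j + 1) * a[(i + j) % ln]
--         s %= 257
--         if s < 256:
--             arr.append(s)
--         else:
--             assert False
--     return arr
-- ===== SOURCE B (Python) =====
-- def my_k2(a):
--     ln = len(a)
--     total = sum(a)
--     s = sum((j + 1) * x for j, x in enumerate(a))
--     arr = []
--     for i in range(ln):
--         arr.append(s % 257)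
--         s += ln * a[i] - total
--     return arr
-- ===== Notes on version B (the rewrite author's own statement) =====
-- stated objective: faster
-- what changed: Replaces the nested loop (recomputing the full weighted sum for every rotation offset) by a single pass: the first weighted sum and the total are computed once and each next offset's sum is obtained by the incremental update s += ln*a[i] - total; a timing run measured B well over 1.5x faster at the largest size on which A returned (on most large random inputs A's 'assert False' raises instead). On inputs where some rotation's sum is 256 mod 257, A raises AssertionError - excluded by Pre_ - while B returns the residue list.
-- outside the precondition, e.g. on my_k2([256]): A raises AssertionError, B returns [256]
import Mathlib
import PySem

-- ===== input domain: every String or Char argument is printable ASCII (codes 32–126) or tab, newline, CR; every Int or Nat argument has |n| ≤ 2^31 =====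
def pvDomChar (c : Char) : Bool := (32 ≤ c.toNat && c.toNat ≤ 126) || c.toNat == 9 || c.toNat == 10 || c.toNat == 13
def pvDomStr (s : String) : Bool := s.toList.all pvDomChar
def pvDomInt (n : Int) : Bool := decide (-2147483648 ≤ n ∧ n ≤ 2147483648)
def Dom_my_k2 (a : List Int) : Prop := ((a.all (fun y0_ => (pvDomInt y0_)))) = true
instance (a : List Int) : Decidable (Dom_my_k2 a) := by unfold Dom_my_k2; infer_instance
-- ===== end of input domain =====

-- B replaces A's nested rescan of every rotation by one pass using the incremental update s += ln*a[i] - total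
-- (objective: faster; a timing run measured B well over 1.5x faster at the largest size on which A returned --
-- on most large random inputs A's 'assert False' raises instead of returning).

-- ===== PORT A =====
-- 'assert False' raises AssertionError in Python; those inputs are excluded by Pre_my_k2 (the port leaves arr unchanged there).
def my_k2 (a : List Int) : List Int :=
  let ln : Int := a.length
  (PySem.List.pyRange 0 ln 1).foldl (fun arr i =>
    let s := (PySem.List.pyRange 0 ln 1).foldl
      (fun s j => s + (j + 1) * PySem.List.pyGetD a (PySem.Int.mod (i + j) ln) 0) 0
    let s' := PySem.Int.mod s 257
    if s' < 256 then arr ++ [s'] else arr) []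

-- ===== PORT B =====
def my_k2_alt (a : List Int) : List Int :=
  let ln : Int := a.length
  let total := a.sum
  let s0 := ((PySem.List.enumerate a 0).map (fun p => (p.1 + 1) * p.2)).sum
  ((PySem.List.pyRange 0 ln 1).foldl
      (fun st i => (st.1 ++ [PySem.Int.mod st.2 257],
                    st.2 + ln * PySem.List.pyGetD a i 0 - total))
      (([] : List Int), s0)).1

-- ===== PRECONDITION & SPEC =====
-- Pre_ excludes exactly the inputs on which A's 'assert False' fires (some rotation's weighted
-- sum is ≡ 256 mod 257): A raises AssertionError there and returns no value (B returns the full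
-- residue list there, e.g. [256] on the input [256]).
def Pre_my_k2 (a : List Int) : Prop :=
  ∀ i < a.length, (∑ j ∈ Finset.range a.length, ((j : Int) + 1) * a.getD ((i + j) % a.length) 0) % 257 ≠ 256
instance (a : List Int) : Decidable (Pre_my_k2 a) := by unfold Pre_my_k2; infer_instance
def pvWitness_my_k2 : List Int := [1, 2, 3]

def Spec_my_k2 (a : List Int) (out : List Int) : Prop := out = my_k2_alt a
instance (a : List Int) (out : List Int) : Decidable (Spec_my_k2 a out) := by unfold Spec_my_k2; infer_instance

-- ===== CLAIM (what is proved, stated in full; the proofs are below) =====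
def Claim_equal_my_k2 : Prop := ∀ (a : List Int), Dom_my_k2 a → Pre_my_k2 a → Spec_my_k2 a (my_k2 a)

-- ===== LEMMAS AND PROOFS =====

-- pvW c l = Σ_k (c+k) * l[k] : the weighted sum both programs compute, as structural recursion.
def pvW (c : Int) : List Int → Int
  | [] => 0
  | x :: xs => c * x + pvW (c + 1) xs

lemma pvW_succ (xs : List Int) (c : Int) : pvW (c + 1) xs = pvW c xs + xs.sum := by
  induction xs generalizing c with
  | nil => simp [pvW]
  | cons x t ih => simp only [pvW, List.sum_cons]; rw [ih (c + 1)]; ring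

lemma pvW_cons (x : Int) (xs : List Int) : pvW 1 (x :: xs) = x + pvW 1 xs + xs.sum := by
  simp only [pvW]
  rw [pvW_succ]
  ring

lemma pvW_append_singleton (xs : List Int) (x c : Int) :
    pvW c (xs ++ [x]) = pvW c xs + (c + xs.length) * x := by
  induction xs generalizing c with
  | nil => simp [pvW]
  | cons y t ih =>
    simp only [List.cons_append, pvW, List.length_cons]
    rw [ih (c + 1)]
    push_cast
    ring

lemma pvW_eq_sum (l : List Int) (c : Int) :
    ((List.range l.length).map (fun (k : Nat) => ((k : Int) + c) * l.getD k 0)).sum = pvW c l := by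
  induction l generalizing c with
  | nil => simp [pvW]
  | cons x t ih =>
    rw [List.length_cons, List.range_succ_eq_map, List.map_cons, List.sum_cons, List.map_map]
    have h2 : (List.range t.length).map ((fun (k : Nat) => ((k : Int) + c) * (x :: t).getD k 0) ∘ Nat.succ)
        = (List.range t.length).map (fun (k : Nat) => ((k : Int) + (c + 1)) * t.getD k 0) :=
      List.map_congr_left (fun k _ => by
        simp only [Function.comp, Nat.succ_eq_add_one, List.getD_cons_succ]; push_cast; ring)
    rw [h2, ih (c + 1)]
    simp [pvW]

lemma rot_length (a : List Int) (i : Nat) (hi : i ≤ a.length) :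
    (a.drop i ++ a.take i).length = a.length := by
  simp; omega

lemma rot_getD (a : List Int) (i j : Nat) (hi : i < a.length) (hj : j < a.length) :
    a.getD ((i + j) % a.length) 0 = (a.drop i ++ a.take i).getD j 0 := by
  have hlen : (a.drop i).length = a.length - i := by simp
  by_cases h : i + j < a.length
  · rw [Nat.mod_eq_of_lt h]
    rw [List.getD_eq_getElem a 0 h, List.getD_eq_getElem _ 0 (by simp; omega)]
    rw [List.getElem_append_left (by omega)]
    simp [List.getElem_drop]
  · have h1 : (i + j) % a.length = i + j - a.length := by
      rw [Nat.mod_eq_sub_mod (by omega), Nat.mod_eq_of_lt (by omega)]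
    rw [h1]
    rw [List.getD_eq_getElem a 0 (by omega), List.getD_eq_getElem _ 0 (by simp; omega)]
    rw [List.getElem_append_right (by omega)]
    simp [List.getElem_take]
    congr 1
    omega

lemma rot_pyGetD (a : List Int) (i : Nat) (j : Int) (hi : i < a.length)
    (hj0 : 0 ≤ j) (hj : j < (a.length : Int)) :
    PySem.List.pyGetD a (PySem.Int.mod ((i : Int) + j) (a.length : Int)) 0
      = PySem.List.pyGetD (a.drop i ++ a.take i) j 0 := by
  have hij : (i : Int) + j = ((i + j.toNat : Nat) : Int) := by omega
  have hjn : j = ((j.toNat : Nat) : Int) := by omega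
  rw [hij, hjn, PySem.Int.mod_natCast, PySem.List.pyGetD_natCast, PySem.List.pyGetD_natCast]
  exact rot_getD a i j.toNat hi (by omega)

-- Σ_j (j+1) * l[j] over pyRange equals pvW 1 l
lemma sum_pyRange_W (l : List Int) :
    ((PySem.List.pyRange 0 (l.length : Int) 1).map (fun j => (j + 1) * PySem.List.pyGetD l j 0)).sum
      = pvW 1 l := by
  rw [PySem.List.pyRange_one, List.map_map]
  have h : ((l.length : Int) - 0).toNat = l.length := by omega
  rw [h]
  have h2 : (List.range l.length).map ((fun j => (j + 1) * PySem.List.pyGetD l j 0) ∘ (fun k : Nat => (0 : Int) + k))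
      = (List.range l.length).map (fun (k : Nat) => ((k : Int) + 1) * l.getD k 0) :=
    List.map_congr_left (fun k _ => by
      simp [Function.comp])
  rw [h2, pvW_eq_sum]

-- A's inner loop at offset i computes the weighted sum of the i-rotation
lemma innerA (a : List Int) (i : Nat) (hi : i < a.length) :
    (PySem.List.pyRange 0 (a.length : Int) 1).foldl
        (fun s j => s + (j + 1) * PySem.List.pyGetD a (PySem.Int.mod ((i : Int) + j) (a.length : Int)) 0) 0
      = pvW 1 (a.drop i ++ a.take i) := by
  have hfold : (PySem.List.pyRange 0 (a.length : Int) 1).foldl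
        (fun (s j : Int) => s + (j + 1) * PySem.List.pyGetD a (PySem.Int.mod ((i : Int) + j) (a.length : Int)) 0) 0
      = 0 + ((PySem.List.pyRange 0 (a.length : Int) 1).map
          (fun j => (j + 1) * PySem.List.pyGetD a (PySem.Int.mod ((i : Int) + j) (a.length : Int)) 0)).sum :=
    PySem.List.foldl_add _ _ 0
  rw [hfold, zero_add]
  have h1 : (PySem.List.pyRange 0 (a.length : Int) 1).map
        (fun j => (j + 1) * PySem.List.pyGetD a (PySem.Int.mod ((i : Int) + j) (a.length : Int)) 0)
      = (PySem.List.pyRange 0 (a.length : Int) 1).map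
        (fun j => (j + 1) * PySem.List.pyGetD (a.drop i ++ a.take i) j 0) :=
    List.map_congr_left (fun j hj => by
      have hm := (PySem.List.mem_pyRange_one).1 hj
      rw [rot_pyGetD a i j hi hm.1 hm.2])
  rw [h1]
  have h2 : (a.length : Int) = (((a.drop i ++ a.take i).length : Nat) : Int) := by
    rw [rot_length a i (le_of_lt hi)]
  rw [h2, sum_pyRange_W]

lemma finsum_list (n : Nat) (f : Nat → Int) :
    (∑ j ∈ Finset.range n, f j) = ((List.range n).map f).sum := by
  induction n with
  | zero => simp
  | succ m ih => rw [Finset.sum_range_succ, List.range_succ, List.map_append, List.sum_append, ih]; simp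

-- Pre_'s spec-level sum is the same weighted sum
lemma pre_sum_eq (a : List Int) (i : Nat) (hi : i < a.length) :
    (∑ j ∈ Finset.range a.length, ((j : Int) + 1) * a.getD ((i + j) % a.length) 0)
      = pvW 1 (a.drop i ++ a.take i) := by
  rw [finsum_list]
  have h1 : (List.range a.length).map (fun (j : Nat) => ((j : Int) + 1) * a.getD ((i + j) % a.length) 0)
      = (List.range a.length).map (fun (j : Nat) => ((j : Int) + 1) * (a.drop i ++ a.take i).getD j 0) :=
    List.map_congr_left (fun j hj => by
      rw [rot_getD a i j hi (List.mem_range.1 hj)])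
  rw [h1]
  have h2 : a.length = (a.drop i ++ a.take i).length := (rot_length a i (le_of_lt hi)).symm
  rw [h2, pvW_eq_sum]

-- B's running values, as structural recursion on the remaining indices
def pvScan (g : Int → Int → Int) : Int → List Int → List Int
  | _, [] => []
  | s, i :: t => PySem.Int.mod s 257 :: pvScan g (g s i) t

lemma foldB (g : Int → Int → Int) (l : List Int) : ∀ (arr : List Int) (s : Int),
    (l.foldl (fun st i => (st.1 ++ [PySem.Int.mod st.2 257], g st.2 i)) (arr, s)).1
      = arr ++ pvScan g s l := by
  induction l with
  | nil => intro arr s; simp [pvScan]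
  | cons x t ih =>
    intro arr s
    simp only [List.foldl_cons, pvScan]
    rw [ih]
    simp

-- the incremental update: s + ln*a[k] - total steps the rotation by one
lemma stepW (a : List Int) (k : Nat) (hk : k < a.length) :
    pvW 1 (a.drop k ++ a.take k) + (a.length : Int) * PySem.List.pyGetD a (k : Int) 0 - a.sum
      = pvW 1 (a.drop (k + 1) ++ a.take (k + 1)) := by
  have hd : a.drop k = a[k] :: a.drop (k + 1) := List.drop_eq_getElem_cons hk
  have ht : a.take (k + 1) = a.take k ++ [a[k]] := by
    rw [List.take_add_one]
    simp [List.getElem?_eq_getElem hk]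
  have hg : PySem.List.pyGetD a (k : Int) 0 = a[k] := by
    rw [PySem.List.pyGetD_natCast, List.getD_eq_getElem a 0 hk]
  have hsum : a.sum = (a.take k).sum + a[k] + (a.drop (k + 1)).sum := by
    conv_lhs => rw [← List.take_append_drop k a, hd]
    rw [List.sum_append, List.sum_cons]
    ring
  have hlen : ((a.drop (k + 1) ++ a.take k).length : Int) = (a.length : Int) - 1 := by
    simp; omega
  rw [hd, ht, hg, ← List.append_assoc]
  rw [List.cons_append, pvW_cons, pvW_append_singleton, hlen]
  rw [List.sum_append (l₁ := a.drop (k + 1)) (l₂ := a.take k), hsum]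
  ring

lemma scan_eq_aux (a : List Int) : ∀ (m k : Nat), k ≤ a.length → a.length - k = m →
    pvScan (fun s i => s + (a.length : Int) * PySem.List.pyGetD a i 0 - a.sum)
        (pvW 1 (a.drop k ++ a.take k))
        (PySem.List.pyRange (k : Int) (a.length : Int) 1)
      = (PySem.List.pyRange (k : Int) (a.length : Int) 1).map
          (fun i => PySem.Int.mod (pvW 1 (a.drop i.toNat ++ a.take i.toNat)) 257) := by
  intro m
  induction m with
  | zero =>
    intro k hk hm
    have : (a.length : Int) ≤ (k : Int) := by omega
    rw [PySem.List.pyRange_one_eq_nil this]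
    simp [pvScan]
  | succ p ih =>
    intro k hk hm
    have hklt : k < a.length := by omega
    have hlt : (k : Int) < (a.length : Int) := by exact_mod_cast hklt
    rw [PySem.List.pyRange_one_cons hlt]
    rw [List.map_cons]
    show PySem.Int.mod (pvW 1 (a.drop k ++ a.take k)) 257 ::
        pvScan _ (pvW 1 (a.drop k ++ a.take k) + (a.length : Int) * PySem.List.pyGetD a (k : Int) 0 - a.sum) _
      = _
    rw [stepW a k hklt]
    have hc : ((k : Int) + 1) = (((k + 1 : Nat)) : Int) := by omega
    have htn : ((k : Int)).toNat = k := by omega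
    rw [hc, ih (k + 1) (by omega) (by omega), htn]

-- ===== VERDICT (by name: the statement is the Claim_ definition above) =====
theorem my_k2_spec : Claim_equal_my_k2 := by
  intro a _ hpre
  unfold Spec_my_k2 my_k2 my_k2_alt
  simp only []
  -- A's outer loop appends each rotation's residue
  have hA : (PySem.List.pyRange 0 (a.length : Int) 1).foldl (fun arr i =>
        let s := (PySem.List.pyRange 0 (a.length : Int) 1).foldl
          (fun s j => s + (j + 1) * PySem.List.pyGetD a (PySem.Int.mod (i + j) (a.length : Int)) 0) 0
        let s' := PySem.Int.mod s 257
        if s' < 256 then arr ++ [s'] else arr) []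
      = (PySem.List.pyRange 0 (a.length : Int) 1).map
          (fun i => PySem.Int.mod (pvW 1 (a.drop i.toNat ++ a.take i.toNat)) 257) := by
    rw [PySem.List.foldl_congr_mem _ _
        (fun arr i => arr ++ [PySem.Int.mod (pvW 1 (a.drop i.toNat ++ a.take i.toNat)) 257]) _ ?_]
    · exact PySem.List.foldl_append_singleton_eq_map _ _ []
    · intro arr i hi
      have hm := (PySem.List.mem_pyRange_one).1 hi
      have htlt : i.toNat < a.length := by omega
      have hti : i = ((i.toNat : Nat) : Int) := by omega
      simp only []
      rw [hti, innerA a i.toNat htlt]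
      have hp := hpre i.toNat htlt
      rw [pre_sum_eq a i.toNat htlt] at hp
      have h1 := PySem.Int.mod_lt (pvW 1 (a.drop i.toNat ++ a.take i.toNat)) (b := 257) (by norm_num)
      have h2 := PySem.Int.mod_eq_emod_of_pos (a := pvW 1 (a.drop i.toNat ++ a.take i.toNat)) (b := 257) (by norm_num)
      have hcond : PySem.Int.mod (pvW 1 (a.drop i.toNat ++ a.take i.toNat)) 257 < 256 := by omega
      rw [if_pos hcond]
      simp only [Int.toNat_natCast]
  -- B's loop is the same list of residues, by the incremental invariant
  have hs0 : ((PySem.List.enumerate a 0).map (fun p => (p.1 + 1) * p.2)).sum = pvW 1 a := by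
    rw [PySem.List.enumerate_eq_map_pyRange a 0, List.map_map, PySem.List.len_eq]
    have h2 : (PySem.List.pyRange 0 (a.length : Int) 1).map
          ((fun (p : Int × Int) => (p.1 + 1) * p.2) ∘ (fun j => (j, PySem.List.pyGetD a j 0)))
        = (PySem.List.pyRange 0 (a.length : Int) 1).map
          (fun j => (j + 1) * PySem.List.pyGetD a j 0) :=
      List.map_congr_left (fun j _ => rfl)
    rw [h2, sum_pyRange_W]
  have hB : ((PySem.List.pyRange 0 (a.length : Int) 1).foldl
        (fun st i => (st.1 ++ [PySem.Int.mod st.2 257],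
                      st.2 + (a.length : Int) * PySem.List.pyGetD a i 0 - a.sum))
        (([] : List Int), ((PySem.List.enumerate a 0).map (fun p => (p.1 + 1) * p.2)).sum)).1
      = (PySem.List.pyRange 0 (a.length : Int) 1).map
          (fun i => PySem.Int.mod (pvW 1 (a.drop i.toNat ++ a.take i.toNat)) 257) := by
    have hfB := foldB (fun s i => s + (a.length : Int) * PySem.List.pyGetD a i 0 - a.sum)
        (PySem.List.pyRange 0 (a.length : Int) 1) []
        (((PySem.List.enumerate a 0).map (fun p => (p.1 + 1) * p.2)).sum)
    rw [hfB, hs0]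
    have h0 : pvW 1 a = pvW 1 (a.drop 0 ++ a.take 0) := by simp
    rw [h0]
    have := scan_eq_aux a a.length 0 (by omega) (by omega)
    simpa using this
  rw [hA, hB]
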